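-- pv_equiv track=rewrite | github.com/creditimpact/finance-project-2-0 | backend/core/logic/consistency.py | _determine_consensus
-- ===== SOURCE A (Python) =====
-- from typing import Any, Dict, Mapping, MutableMapping, Optional, Sequence, Tuple
--
-- def _determine_consensus(field: str, groups: Mapping[Any, Sequence[str]]) -> Tuple[str, list[str]]:
--     items = [(key, list(bureaus)) for key, bureaus in groups.items() if bureaus]
--     if not items:
--         return "unanimous", []
--
--     if len(items) == 1:
--         return "unanimous", []
--
--     total = sum(len(bureaus) for _, bureaus in items)
--     sorted_items = sorted(items, key=lambda item: (-len(item[1]), str(item[0])))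
--     top_key, top_bureaus = sorted_items[0]
--     top_count = len(top_bureaus)
--
--     if top_count > total / 2:
--         disagreeing = [bureau for key, bureaus in items if key != top_key for bureau in bureaus]
--         disagreeing.sort()
--         return "majority", disagreeing
--
--     disagreeing = [bureau for _, bureaus in items for bureau in bureaus]
--     disagreeing.sort()
--     return "split", disagreeing
-- ===== SOURCE B (Python) =====
-- def _determine_consensus(field, groups):
--     # One streaming pass: track group count, total, the running top group, and a
--     # "losers" pool of bureaus displaced from (or never holding) the top spot.
--     n = 0
--     total = 0
--     top_key = None
--     top_bureaus = []
--     losers = []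
--     for key, bureaus in groups.items():
--         bs = list(bureaus)
--         if not bs:
--             continue
--         n += 1
--         total += len(bs)
--         if len(bs) > len(top_bureaus):
--             losers.extend(top_bureaus)
--             top_key, top_bureaus = key, bs
--         else:
--             losers.extend(bs)
--     if n <= 1:
--         return "unanimous", []
--     if 2 * len(top_bureaus) > total:
--         return "majority", sorted(losers)
--     return "split", sorted(losers + top_bureaus)
-- ===== Notes on version B (the rewrite author's own statement) =====
-- stated objective: alternative
-- what changed: Replaced A's staged pipeline (materialize filtered items, sum, full tuple-key sort, index [0], then a second comprehension pass over items to rebuild the disagreeing list) by a single streaming fold over the dict items that simultaneously counts groups, sums bureaus, maintains the running top group and incrementally accumulates the displaced groups' bureaus in a 'losers' pool, so the group sort and the second pass over the groups disappear; correct because a strict-majority group is the unique maximum, and the final sort makes the losers' accumulation order irrelevant.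
import Mathlib
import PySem

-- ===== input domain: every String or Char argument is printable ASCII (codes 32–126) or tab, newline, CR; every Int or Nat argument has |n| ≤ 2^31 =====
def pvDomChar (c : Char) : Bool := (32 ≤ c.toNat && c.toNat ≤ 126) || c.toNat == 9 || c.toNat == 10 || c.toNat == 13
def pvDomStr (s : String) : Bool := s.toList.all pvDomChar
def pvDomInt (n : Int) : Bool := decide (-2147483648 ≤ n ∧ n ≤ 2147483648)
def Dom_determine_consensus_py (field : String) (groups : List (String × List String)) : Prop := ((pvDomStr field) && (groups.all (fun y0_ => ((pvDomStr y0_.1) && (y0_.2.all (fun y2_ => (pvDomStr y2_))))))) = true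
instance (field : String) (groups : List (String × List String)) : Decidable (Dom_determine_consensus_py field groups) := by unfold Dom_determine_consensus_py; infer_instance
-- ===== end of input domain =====

-- B replaces A's filter + group sort + second pass by ONE streaming fold that tracks the
-- running top group and pools the displaced groups' bureaus (objective: alternative);
-- equal return values, proved below.

-- ===== PORT A =====
-- literal port of _determine_consensus (Source A)
def determine_consensus_py (field : String) (groups : List (String × List String)) : String × List String :=
  let items := (PySem.Dict.ofList groups).items.filter (fun p => !p.2.isEmpty)
  if items = [] then ("unanimous", [])
  else if items.length = 1 then ("unanimous", [])
  else
    let total := (items.map (fun p => p.2.length)).sum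
    let sorted_items := PySem.List.sorted2 items (fun it => -(it.2.length : Int)) (fun it => it.1)
    let top := sorted_items.headD ("", [])  -- sorted_items[0]; sorted_items is provably nonempty here
    let top_count := top.2.length
    -- Python's `top_count > total / 2` (float division) is exact on ints as `2*top_count > total`
    if 2 * top_count > total then
      ("majority", PySem.List.sorted ((items.filter (fun p => p.1 != top.1)).flatMap (fun p => p.2)) (fun x => x))
    else
      ("split", PySem.List.sorted (items.flatMap (fun p => p.2)) (fun x => x))

-- ===== PORT B =====
-- literal port of _determine_consensus (Source B): state = (n, total, top, losers)
def pvStepB1 (st : Nat × Nat × (String × List String) × List String) (p : String × List String) : Nat × Nat × (String × List String) × List String :=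
  if p.2.length > st.2.2.1.2.length then (st.1 + 1, st.2.1 + p.2.length, p, st.2.2.2 ++ st.2.2.1.2)
  else (st.1 + 1, st.2.1 + p.2.length, st.2.2.1, st.2.2.2 ++ p.2)

def pvStepB (st : Nat × Nat × (String × List String) × List String) (p : String × List String) : Nat × Nat × (String × List String) × List String :=
  if p.2.isEmpty then st else pvStepB1 st p

def determine_consensus_py_alt (field : String) (groups : List (String × List String)) : String × List String :=
  let st := ((PySem.Dict.ofList groups).items).foldl pvStepB (0, 0, ("", []), [])
  if st.1 ≤ 1 then ("unanimous", [])
  else if 2 * st.2.2.1.2.length > st.2.1 then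
    ("majority", PySem.List.sorted st.2.2.2 (fun x => x))
  else
    ("split", PySem.List.sorted (st.2.2.2 ++ st.2.2.1.2) (fun x => x))

-- ===== PRECONDITION & SPEC =====
def Spec_determine_consensus_py (field : String) (groups : List (String × List String)) (out : String × List String) : Prop := out = determine_consensus_py_alt field groups
instance (field : String) (groups : List (String × List String)) (out : String × List String) : Decidable (Spec_determine_consensus_py field groups out) := by unfold Spec_determine_consensus_py; infer_instance

-- ===== CLAIM =====
def Claim_equal_determine_consensus_py : Prop := ∀ (field : String) (groups : List (String × List String)), Dom_determine_consensus_py field groups → Spec_determine_consensus_py field groups (determine_consensus_py field groups)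

-- ===== LEMMAS AND PROOFS =====

-- skipping empty groups in the fold = folding over the filtered items
theorem pv_foldB_filter (l : List (String × List String)) :
    ∀ st, l.foldl pvStepB st = (l.filter (fun p => !p.2.isEmpty)).foldl pvStepB1 st := by
  induction l with
  | nil => intro st; rfl
  | cons p rest ih =>
    intro st
    by_cases h : p.2.isEmpty
    · simp [List.foldl_cons, pvStepB, h, ih]
    · simp [List.foldl_cons, pvStepB, h, ih]

-- invariant of the streaming fold over the (all-nonempty) filtered items
theorem pv_inv (l : List (String × List String)) (hne : ∀ p ∈ l, p.2 ≠ []) :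
    ∀ st : Nat × Nat × (String × List String) × List String,
      (l.foldl pvStepB1 st).1 = st.1 + l.length ∧
      (l.foldl pvStepB1 st).2.1 = st.2.1 + (l.map (fun p => p.2.length)).sum ∧
      ((l.foldl pvStepB1 st).2.2.1 = st.2.2.1 ∨ (l.foldl pvStepB1 st).2.2.1 ∈ l) ∧
      st.2.2.1.2.length ≤ (l.foldl pvStepB1 st).2.2.1.2.length ∧
      (∀ y ∈ l, y.2.length ≤ (l.foldl pvStepB1 st).2.2.1.2.length) ∧
      ((l.foldl pvStepB1 st).2.2.2 ++ (l.foldl pvStepB1 st).2.2.1.2).Perm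
        ((st.2.2.2 ++ st.2.2.1.2) ++ l.flatMap (fun p => p.2)) := by
  induction l with
  | nil => intro st; simp
  | cons p rest ih =>
    intro st
    have hner : ∀ q ∈ rest, q.2 ≠ [] := fun q hq => hne q (List.mem_cons_of_mem _ hq)
    obtain ⟨ih1, ih2, ih3, ih4, ih5, ih6⟩ := ih hner (pvStepB1 st p)
    rw [List.foldl_cons]
    by_cases hc : p.2.length > st.2.2.1.2.length
    · have hst : pvStepB1 st p = (st.1 + 1, st.2.1 + p.2.length, p, st.2.2.2 ++ st.2.2.1.2) := by
        simp [pvStepB1, hc]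
      rw [hst] at ih1 ih2 ih3 ih4 ih5 ih6 ⊢
      refine ⟨by simpa [Nat.add_assoc, Nat.add_comm 1] using ih1,
              by simpa [Nat.add_assoc] using ih2,
              ?_, ?_, ?_, ?_⟩
      · rcases ih3 with h | h
        · exact Or.inr (h ▸ List.mem_cons_self ..)
        · exact Or.inr (List.mem_cons_of_mem _ h)
      · exact le_trans (le_of_lt hc) ih4
      · intro y hy
        rcases List.mem_cons.1 hy with rfl | hy
        · exact ih4
        · exact ih5 y hy
      · refine ih6.trans ?_
        -- ((losers ++ top.2) ++ p.2) ++ F equals (losers ++ top.2) ++ (p.2 ++ F) up to assoc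
        simp [List.append_assoc, List.flatMap_cons]
    · have hst : pvStepB1 st p = (st.1 + 1, st.2.1 + p.2.length, st.2.2.1, st.2.2.2 ++ p.2) := by
        simp [pvStepB1, hc]
      rw [hst] at ih1 ih2 ih3 ih4 ih5 ih6 ⊢
      refine ⟨by simpa [Nat.add_assoc, Nat.add_comm 1] using ih1,
              by simpa [Nat.add_assoc] using ih2,
              ?_, ih4, ?_, ?_⟩
      · rcases ih3 with h | h
        · exact Or.inl h
        · exact Or.inr (List.mem_cons_of_mem _ h)
      · intro y hy
        rcases List.mem_cons.1 hy with rfl | hy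
        · exact le_trans (le_of_not_gt hc) ih4
        · exact ih5 y hy
      · refine ih6.trans ?_
        -- ((losers ++ p.2) ++ top.2) ++ F ~ (losers ++ top.2) ++ (p.2 ++ F): swap p.2 and top.2
        have hsw := ((List.perm_append_comm (l₁ := p.2) (l₂ := st.2.2.1.2)).append_right
          (rest.flatMap (fun q => q.2))).append_left st.2.2.2
        simpa [List.append_assoc, List.flatMap_cons] using hsw

-- removing the (unique-keyed) top item by key: its bureaus plus the rest's are all bureaus
theorem pv_filter_key_perm (l : List (String × List String)) (top : String × List String)
    (hnd : (l.map Prod.fst).Nodup) (hmem : top ∈ l) :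
    (top.2 ++ (l.filter (fun p => p.1 != top.1)).flatMap (fun p => p.2)).Perm
      (l.flatMap (fun p => p.2)) := by
  induction l with
  | nil => simp at hmem
  | cons x rest ih =>
    simp only [List.map_cons, List.nodup_cons] at hnd
    rcases List.mem_cons.1 hmem with rfl | hmem'
    · have hrest : rest.filter (fun p => p.1 != top.1) = rest := by
        apply List.filter_eq_self.2
        intro q hq
        simp only [bne_iff_ne]
        intro hk
        exact hnd.1 (hk ▸ List.mem_map_of_mem hq)
      simp [hrest]
    · have hkne : x.1 ≠ top.1 := by
        intro hk
        exact hnd.1 (hk ▸ List.mem_map_of_mem hmem')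
      have hkeep : (x.1 != top.1) = true := by simpa [bne_iff_ne] using hkne
      simp only [List.filter_cons, hkeep, if_pos, List.flatMap_cons]
      have hsw : (top.2 ++ (x.2 ++ (rest.filter (fun p => p.1 != top.1)).flatMap (fun p => p.2))).Perm
          (x.2 ++ (top.2 ++ (rest.filter (fun p => p.1 != top.1)).flatMap (fun p => p.2))) := by
        have := (List.perm_append_comm (l₁ := top.2) (l₂ := x.2)).append_right
          ((rest.filter (fun p => p.1 != top.1)).flatMap (fun p => p.2))
        simpa [List.append_assoc] using this
      exact hsw.trans ((ih hnd.2 hmem').append_left x.2)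

-- the comparison sorted2 uses internally for A's tuple key (-len(bureaus), key)
def pvLtAB (a b : String × List String) : Bool :=
  decide (-(a.2.length : Int) < -(b.2.length : Int)) ||
    (!decide (-(b.2.length : Int) < -(a.2.length : Int)) && decide (a.1 < b.1))

theorem pvLtAB_irrefl (a : String × List String) : pvLtAB a a = false := by
  simp [pvLtAB]

theorem pvLtAB_trans (a b c : String × List String) :
    pvLtAB a b = true → pvLtAB b c = true → pvLtAB a c = true := by
  simp only [pvLtAB, Bool.or_eq_true, Bool.and_eq_true, Bool.not_eq_eq_eq_not, Bool.not_true,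
    decide_eq_true_eq, decide_eq_false_iff_not]
  intro hab hbc
  rcases hab with h | ⟨h1, h2⟩ <;> rcases hbc with h' | ⟨h1', h2'⟩
  · exact Or.inl (lt_trans h h')
  · exact Or.inl (lt_of_lt_of_le h (le_of_not_gt h1'))
  · exact Or.inl (lt_of_le_of_lt (le_of_not_gt h1) h')
  · exact Or.inr ⟨fun hc => h1' (lt_of_lt_of_le hc (le_of_not_gt h1)), lt_trans h2 h2'⟩

-- head-minimality invariant for insertion into a list whose head is minimal
theorem pvHdMin_insertBy (before : (String × List String) → (String × List String) → Bool)
    (hirr : ∀ a, before a a = false)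
    (htr : ∀ a b c, before a b = true → before b c = true → before a c = true)
    (x : String × List String) (acc : List (String × List String))
    (hacc : ∀ h0 t0, acc = h0 :: t0 → ∀ y ∈ acc, before y h0 = false) :
    ∀ h0 t0, PySem.List.insertBy before x acc = h0 :: t0 →
      ∀ y ∈ PySem.List.insertBy before x acc, before y h0 = false := by
  cases acc with
  | nil =>
    intro h0 t0 heq y hy
    simp [PySem.List.insertBy] at heq hy
    subst hy; rw [heq.1]; exact hirr _
  | cons h t =>
    intro h0 t0 heq y hy
    by_cases hb : before x h = true
    · simp only [PySem.List.insertBy, hb, if_pos] at heq hy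
      obtain ⟨rfl, -⟩ := List.cons.inj heq
      rcases List.mem_cons.1 hy with rfl | hy
      · exact hirr _
      · have hyh : before y h = false := hacc h t rfl y hy
        by_contra hyx
        have hyx' : before y x = true := by
          cases hx : before y x
          · exact absurd hx hyx
          · rfl
        exact absurd (htr y x h hyx' hb) (by simp [hyh])
    · have hbf : before x h = false := by cases hx : before x h; rfl; exact absurd hx hb
      simp only [PySem.List.insertBy, hbf] at heq hy
      simp only [Bool.false_eq_true, if_false] at heq hy
      obtain ⟨rfl, -⟩ := List.cons.inj heq
      rcases List.mem_cons.1 hy with rfl | hy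
      · exact hirr _
      · rw [PySem.List.mem_insertBy] at hy
        rcases hy with rfl | hy
        · exact hbf
        · exact hacc h t rfl y (List.mem_cons_of_mem _ hy)

theorem pvHdMin_foldl (before : (String × List String) → (String × List String) → Bool)
    (hirr : ∀ a, before a a = false)
    (htr : ∀ a b c, before a b = true → before b c = true → before a c = true)
    (xs : List (String × List String)) :
    ∀ (acc : List (String × List String)),
      (∀ h0 t0, acc = h0 :: t0 → ∀ y ∈ acc, before y h0 = false) →
      ∀ h0 t0, xs.foldl (fun acc x => PySem.List.insertBy before x acc) acc = h0 :: t0 →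
        ∀ y ∈ xs.foldl (fun acc x => PySem.List.insertBy before x acc) acc, before y h0 = false := by
  induction xs with
  | nil => intro acc hacc; simpa using hacc
  | cons x xs ih =>
    intro acc hacc
    exact ih _ (pvHdMin_insertBy before hirr htr x acc hacc)

-- the head of A's sorted list has maximal bureau count
theorem pv_sorted2_head_max (xs : List (String × List String))
    (h0 : String × List String) (t0 : List (String × List String))
    (heq : PySem.List.sorted2 xs (fun it => -(it.2.length : Int)) (fun it => it.1) = h0 :: t0) :
    ∀ y ∈ xs, y.2.length ≤ h0.2.length := by
  intro y hy
  have hperm : (PySem.List.sorted2 xs (fun it => -(it.2.length : Int)) (fun it => it.1)).Perm xs :=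
    PySem.List.sorted2_perm ..
  have hmem : y ∈ PySem.List.sorted2 xs (fun it => -(it.2.length : Int)) (fun it => it.1) :=
    hperm.mem_iff.2 hy
  have hfold : PySem.List.sorted2 xs (fun it => -(it.2.length : Int)) (fun it => it.1) =
      xs.foldl (fun acc x => PySem.List.insertBy pvLtAB x acc) [] := rfl
  have := pvHdMin_foldl pvLtAB pvLtAB_irrefl pvLtAB_trans xs [] (by intro h t h'; simp at h')
    h0 t0 (hfold ▸ heq) y (hfold ▸ hmem)
  simp only [pvLtAB, Bool.or_eq_false_iff, Bool.and_eq_false_iff, decide_eq_false_iff_not] at this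
  omega

-- two distinct members both contribute to the sum
theorem pv_two_mem_le_sum (f : (String × List String) → Nat) :
    ∀ (l : List (String × List String)) (a b : String × List String),
      a ∈ l → b ∈ l → a ≠ b → f a + f b ≤ (l.map f).sum := by
  intro l
  induction l with
  | nil => intro a b ha; simp at ha
  | cons x t ih =>
    intro a b ha hb hne
    have hsingle : ∀ c, c ∈ t → f c ≤ (t.map f).sum := by
      intro c hc
      exact List.single_le_sum (by intro z _; exact Nat.zero_le z) _ (List.mem_map_of_mem hc)
    rcases List.mem_cons.1 ha with rfl | ha' <;> rcases List.mem_cons.1 hb with rfl | hb'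
    · exact absurd rfl hne
    · simp only [List.map_cons, List.sum_cons]
      have := hsingle b hb'; omega
    · simp only [List.map_cons, List.sum_cons]
      have := hsingle a ha'; omega
    · simp only [List.map_cons, List.sum_cons]
      have := ih a b ha' hb' hne; omega

-- ===== VERDICT =====
theorem determine_consensus_py_spec : Claim_equal_determine_consensus_py := by
  intro field groups _
  unfold Spec_determine_consensus_py determine_consensus_py determine_consensus_py_alt
  rw [pv_foldB_filter]
  set items := (PySem.Dict.ofList groups).items.filter (fun p => !p.2.isEmpty) with hitems
  have hne : ∀ p ∈ items, p.2 ≠ [] := by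
    intro p hp
    have := List.of_mem_filter hp
    simpa [List.isEmpty_iff] using this
  obtain ⟨h1, h2, h3, h4, h5, h6⟩ := pv_inv items hne (0, 0, ("", []), [])
  simp only [List.nil_append, List.append_nil, Nat.zero_add] at h1 h2 h6
  set st := items.foldl pvStepB1 (0, 0, ("", []), []) with hst
  by_cases hnil : items = []
  · have : st.1 ≤ 1 := by rw [h1, hnil]; simp
    simp [hnil, this]
  · by_cases hone : items.length = 1
    · have : st.1 ≤ 1 := by rw [h1, hone]
      simp [hnil, hone, this]
    · have hlen2 : 2 ≤ items.length := by
        rcases items with _ | ⟨x, _ | ⟨y, t⟩⟩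
        · exact absurd rfl hnil
        · exact absurd rfl hone
        · simp
      have hn : ¬ st.1 ≤ 1 := by rw [h1]; omega
      -- top is a real member with maximal count
      have htopmem : st.2.2.1 ∈ items := by
        rcases h3 with h | h
        · exfalso
          rcases items with _ | ⟨x, t⟩
          · exact hnil rfl
          · have := h5 x (List.mem_cons_self ..)
            rw [h] at this
            have hx := hne x (List.mem_cons_self ..)
            simp at this
            exact hx this
        · exact h
      have htopmax : ∀ y ∈ items, y.2.length ≤ st.2.2.1.2.length := h5
      -- A's sorted head
      cases hs : PySem.List.sorted2 items (fun it => -(it.2.length : Int)) (fun it => it.1) with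
      | nil =>
        have hperm : (PySem.List.sorted2 items (fun it => -(it.2.length : Int)) (fun it => it.1)).Perm items :=
          PySem.List.sorted2_perm ..
        rw [hs] at hperm
        exact absurd hperm.symm.eq_nil hnil
      | cons h0 t0 =>
        have hperm : (PySem.List.sorted2 items (fun it => -(it.2.length : Int)) (fun it => it.1)).Perm items :=
          PySem.List.sorted2_perm ..
        have hh0mem : h0 ∈ items := hperm.mem_iff.1 (hs ▸ List.mem_cons_self ..)
        have hhd : ∀ y ∈ items, y.2.length ≤ h0.2.length := pv_sorted2_head_max items h0 t0 hs
        have hcnt : h0.2.length = st.2.2.1.2.length :=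
          le_antisymm (htopmax h0 hh0mem) (hhd st.2.2.1 htopmem)
        have htot : st.2.1 = (items.map (fun p => p.2.length)).sum := h2
        have hlosers : (st.2.2.2 ++ st.2.2.1.2).Perm (items.flatMap (fun p => p.2)) := by
          simpa using h6
        simp only [hnil, if_false, hone, hs, List.headD_cons, hn]
        by_cases hcond : 2 * h0.2.length > (items.map (fun p => p.2.length)).sum
        · have hcond' : 2 * st.2.2.1.2.length > st.2.1 := by rw [htot, ← hcnt]; exact hcond
          have heqtop : h0 = st.2.2.1 := by
            by_contra hne'
            have := pv_two_mem_le_sum (fun p => p.2.length) items h0 st.2.2.1 hh0mem htopmem hne'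
            simp only at this
            omega
          simp only [if_pos hcond, if_pos hcond']
          -- majority: sorted(disagreeing-by-key) = sorted(losers)
          refine congrArg (Prod.mk "majority") ?_
          have hndkeys : (items.map Prod.fst).Nodup := by
            have hsub : items.Sublist (PySem.Dict.ofList groups).items := List.filter_sublist
            have : ((PySem.Dict.ofList groups).items.map Prod.fst).Nodup :=
              PySem.Dict.nodup_keys_ofList groups
            exact (hsub.map Prod.fst).nodup this
          have hfk := pv_filter_key_perm items st.2.2.1 hndkeys htopmem
          have hperm2 : ((items.filter (fun p => p.1 != st.2.2.1.1)).flatMap (fun p => p.2)).Perm st.2.2.2 := by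
            have hA : (st.2.2.1.2 ++ (items.filter (fun p => p.1 != st.2.2.1.1)).flatMap (fun p => p.2)).Perm
                (st.2.2.2 ++ st.2.2.1.2) := hfk.trans hlosers.symm
            have hB : ((items.filter (fun p => p.1 != st.2.2.1.1)).flatMap (fun p => p.2) ++ st.2.2.1.2).Perm
                (st.2.2.2 ++ st.2.2.1.2) := List.perm_append_comm.trans hA
            exact (List.perm_append_right_iff _).1 hB
          rw [heqtop]
          exact (PySem.List.sorted_id_eq_sorted_id_iff_perm ..).2 hperm2
        · have hcond' : ¬ 2 * st.2.2.1.2.length > st.2.1 := by rw [htot, ← hcnt]; exact hcond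
          simp only [if_neg hcond, if_neg hcond']
          refine congrArg (Prod.mk "split") ?_
          exact (PySem.List.sorted_id_eq_sorted_id_iff_perm ..).2 hlosers.symm
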